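-- pv_equiv track=rewrite | github.com/cmgoffena13/coder | src/internal/memory_utils.py | _choose_session_by_query
-- ===== SOURCE A (Python) =====
-- def _choose_session_by_query(
--     query: str, candidates: list[tuple[str, str]]
-- ) -> tuple[str, str] | None:
--     q = query.lower()
--     exact = [c for c in candidates if c[0].lower() == q]
--     if len(exact) == 1:
--         return exact[0]
--     starts = [c for c in candidates if c[0].lower().startswith(q)]
--     if len(starts) == 1:
--         return starts[0]
--     contains = [c for c in candidates if q in c[0].lower()]
--     if len(contains) == 1:
--         return contains[0]
--     return None
-- ===== SOURCE B (Python) =====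
-- def _choose_session_by_query(
--     query: str, candidates: list[tuple[str, str]]
-- ) -> tuple[str, str] | None:
--     q = query.lower()
--     exact_count = prefix_count = contains_count = 0
--     exact_first = prefix_first = contains_first = None
--     for c in candidates:
--         name = c[0].lower()
--         if name == q:
--             exact_count += 1
--             if exact_first is None:
--                 exact_first = c
--         if name.startswith(q):
--             prefix_count += 1
--             if prefix_first is None:
--                 prefix_first = c
--         if q in name:
--             contains_count += 1
--             if contains_first is None:
--                 contains_first = c
--     if exact_count == 1:
--         return exact_first
--     if prefix_count == 1:
--         return prefix_first
--     if contains_count == 1: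
--         return contains_first
--     return None
-- ===== Notes on version B (the rewrite author's own statement) =====
-- stated objective: alternative
-- what changed: Replaces the three full list comprehensions (each lowercasing every name again) with a single loop over candidates that lowercases each name once and maintains a (count, first_match) pair per tier (exact/prefix/substring), then checks the tiers in the same priority order.
import Mathlib
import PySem

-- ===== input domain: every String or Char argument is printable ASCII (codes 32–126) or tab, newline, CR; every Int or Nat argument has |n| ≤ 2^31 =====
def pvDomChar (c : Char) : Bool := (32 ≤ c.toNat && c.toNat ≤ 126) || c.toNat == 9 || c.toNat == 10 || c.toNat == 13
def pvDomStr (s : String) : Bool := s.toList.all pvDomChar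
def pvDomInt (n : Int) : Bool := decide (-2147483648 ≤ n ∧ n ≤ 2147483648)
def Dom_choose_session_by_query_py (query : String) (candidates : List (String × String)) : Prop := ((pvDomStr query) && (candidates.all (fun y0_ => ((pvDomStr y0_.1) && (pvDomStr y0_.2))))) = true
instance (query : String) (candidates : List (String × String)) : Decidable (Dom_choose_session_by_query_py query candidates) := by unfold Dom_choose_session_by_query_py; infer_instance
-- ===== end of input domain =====

-- B replaces A's three list comprehensions by a single loop keeping a (count, first-match)
-- pair per tier; same return value, one pass, each name lowercased once (objective: alternative).

-- ===== PORT A =====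
-- 'return exact[0]' etc. is ported as PySem.List.pyGet? _ 0 (some _ whenever the branch is taken,
-- since the list then has length 1), matching the Option result type.
def choose_session_by_query_py (query : String) (candidates : List (String × String)) : Option (String × String) :=
  let q := PySem.Str.lower query
  let exact := candidates.filter (fun c => PySem.Str.lower c.1 == q)
  if exact.length == 1 then PySem.List.pyGet? exact 0
  else
    let starts := candidates.filter (fun c => PySem.Str.startswith (PySem.Str.lower c.1) q)
    if starts.length == 1 then PySem.List.pyGet? starts 0
    else
      let contains := candidates.filter (fun c => PySem.Str.isIn q (PySem.Str.lower c.1))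
      if contains.length == 1 then PySem.List.pyGet? contains 0
      else none

-- ===== PORT B =====
-- one tier's (count, first-match) update
def pvTierStep (hit : Bool) (s : Nat × Option (String × String)) (c : String × String) :
    Nat × Option (String × String) :=
  if hit then (s.1 + 1, if s.2.isNone then some c else s.2) else s

def pvStepB (q : String) (s : (Nat × Option (String × String)) × (Nat × Option (String × String)) × (Nat × Option (String × String)))
    (c : String × String) :
    (Nat × Option (String × String)) × (Nat × Option (String × String)) × (Nat × Option (String × String)) :=
  let name := PySem.Str.lower c.1
  (pvTierStep (name == q) s.1 c,
   pvTierStep (PySem.Str.startswith name q) s.2.1 c,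
   pvTierStep (PySem.Str.isIn q name) s.2.2 c)

def choose_session_by_query_py_alt (query : String) (candidates : List (String × String)) : Option (String × String) :=
  let q := PySem.Str.lower query
  let r := candidates.foldl (pvStepB q) ((0, none), (0, none), (0, none))
  if r.1.1 == 1 then r.1.2
  else if r.2.1.1 == 1 then r.2.1.2
  else if r.2.2.1 == 1 then r.2.2.2
  else none

-- ===== PRECONDITION & SPEC =====
def Spec_choose_session_by_query_py (query : String) (candidates : List (String × String)) (out : Option (String × String)) : Prop := out = choose_session_by_query_py_alt query candidates
instance (query : String) (candidates : List (String × String)) (out : Option (String × String)) : Decidable (Spec_choose_session_by_query_py query candidates out) := by unfold Spec_choose_session_by_query_py; infer_instance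

-- ===== CLAIM (what is proved, stated in full; the proofs are below) =====
def Claim_equal_choose_session_by_query_py : Prop := ∀ (query : String) (candidates : List (String × String)), Dom_choose_session_by_query_py query candidates → Spec_choose_session_by_query_py query candidates (choose_session_by_query_py query candidates)

-- ===== LEMMAS AND PROOFS =====

-- one tier's loop computes the filter's length and first element
theorem pvTier_fold (p : String × String → Bool) (l : List (String × String))
    (s : Nat × Option (String × String)) :
    l.foldl (fun acc c => pvTierStep (p c) acc c) s
      = (s.1 + (l.filter p).length, if s.2.isNone then (l.filter p).head? else s.2) := by
  induction l generalizing s with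
  | nil => cases s with | mk a b => cases b <;> simp [Option.isNone]
  | cons c rest ih =>
    cases s with | mk a b =>
    rw [List.foldl_cons, ih]
    by_cases hp : p c
    · cases b <;> simp [pvTierStep, hp] <;> omega
    · simp [pvTierStep, hp]

theorem pvStepB_fold (q : String) (l : List (String × String))
    (s : (Nat × Option (String × String)) × (Nat × Option (String × String)) × (Nat × Option (String × String))) :
    l.foldl (pvStepB q) s
      = (l.foldl (fun acc c => pvTierStep (PySem.Str.lower c.1 == q) acc c) s.1,
         l.foldl (fun acc c => pvTierStep (PySem.Str.startswith (PySem.Str.lower c.1) q) acc c) s.2.1,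
         l.foldl (fun acc c => pvTierStep (PySem.Str.isIn q (PySem.Str.lower c.1)) acc c) s.2.2) := by
  induction l generalizing s with
  | nil => rfl
  | cons c rest ih => simp [List.foldl, pvStepB, ih]

theorem pvGet0_eq_head? (l : List (String × String)) :
    PySem.List.pyGet? l 0 = l.head? := by
  cases l <;> simp [PySem.List.pyGet?, PySem.List.pyIdx?]

-- ===== VERDICT (by name: the statement is the Claim_ definition above) =====
theorem choose_session_by_query_py_spec : Claim_equal_choose_session_by_query_py := by
  intro query candidates _
  simp only [Spec_choose_session_by_query_py, choose_session_by_query_py,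
    choose_session_by_query_py_alt, pvStepB_fold, pvTier_fold, pvGet0_eq_head?,
    Option.isNone, Nat.zero_add, beq_iff_eq]
  split_ifs <;> simp_all
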